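-- pv_equiv track=rewrite | github.com/ioaksenenko/neural_networks | release/datamaker/main.py | number_input_question_generate
-- ===== SOURCE A (Python) =====
-- def number_input_question_generate(n=1):
--     inputs = []
--     outputs = []
--     for i in range(n):
--         input = '<p>_</p>'
--         output = [[0], [0], [0], [1], [0], [0], [0], [0]]
--         for j in range(i + 1):
--             input += '<p>{#_}</p><p>_</p>'
--             output += [[0], [0], [0], [j + 2], [j + 2], [j + 2], [j + 2], [0], [0], [0], [0], [0], [0], [0], [1], [0], [0], [0], [0]]
--         inputs.append(input)
--         outputs.append(output)
--     return inputs, outputs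
-- ===== SOURCE B (Python) =====
-- def number_input_question_generate(n=1):
--     # Build each row incrementally from the previous one: row i is row i-1
--     # plus one fixed string chunk / one 19-entry label block, avoiding the
--     # quadratic inner loop that rebuilds every row from scratch.
--     inputs = []
--     outputs = []
--     s = '<p>_</p>'
--     out = [[0], [0], [0], [1], [0], [0], [0], [0]]
--     for i in range(n):
--         s = s + '<p>{#_}</p><p>_</p>'
--         out = out + [[0], [0], [0], [i + 2], [i + 2], [i + 2], [i + 2], [0], [0], [0], [0], [0], [0], [0], [1], [0], [0], [0], [0]]
--         inputs.append(s)
--         outputs.append(out)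
--     return inputs, outputs
-- ===== Notes on version B (the rewrite author's own statement) =====
-- stated objective: faster
-- what changed: Each row's string and label matrix are built incrementally by extending the previous row with one fixed chunk, removing A's inner loop that rebuilds every row from scratch by repeated concatenation.
import Mathlib
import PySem

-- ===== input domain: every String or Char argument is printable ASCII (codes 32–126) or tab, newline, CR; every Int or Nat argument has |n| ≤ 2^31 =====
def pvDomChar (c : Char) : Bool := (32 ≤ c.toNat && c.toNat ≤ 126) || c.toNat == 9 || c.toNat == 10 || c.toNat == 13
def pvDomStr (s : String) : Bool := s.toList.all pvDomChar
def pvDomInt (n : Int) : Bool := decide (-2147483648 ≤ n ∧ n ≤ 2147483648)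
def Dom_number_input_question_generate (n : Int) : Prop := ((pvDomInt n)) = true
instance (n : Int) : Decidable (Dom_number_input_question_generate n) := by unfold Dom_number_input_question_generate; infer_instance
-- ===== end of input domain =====

-- B builds each row incrementally from the previous one instead of A's inner loop
-- that rebuilds every row from scratch (objective: faster).

-- shared literals of both Pythons
def pvChunk : String := "<p>{#_}</p><p>_</p>"
def pvBaseOut : List (List Int) := [[0], [0], [0], [1], [0], [0], [0], [0]]
def pvBlock (j : Int) : List (List Int) :=
  [[0], [0], [0], [j + 2], [j + 2], [j + 2], [j + 2], [0], [0], [0], [0], [0], [0], [0], [1], [0], [0], [0], [0]]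

-- ===== PORT A =====
-- A: for i in range(n): rebuild row i with an inner loop over range(i+1), then append it.
def number_input_question_generate (n : Int) : List String × List (List (List Int)) :=
  (PySem.List.pyRange 0 n 1).foldl
    (fun acc i =>
      let inner := (PySem.List.pyRange 0 (i + 1) 1).foldl
        (fun (st : String × List (List Int)) j => (st.1 ++ pvChunk, st.2 ++ pvBlock j))
        ("<p>_</p>", pvBaseOut)
      (acc.1 ++ [inner.1], acc.2 ++ [inner.2]))
    ([], [])

-- ===== PORT B =====
-- B: one loop; the running row (s, out) is extended by one chunk per iteration.
def number_input_question_generate_alt (n : Int) : List String × List (List (List Int)) :=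
  let r := (PySem.List.pyRange 0 n 1).foldl
    (fun (st : List String × List (List (List Int)) × String × List (List Int)) i =>
      let s' := st.2.2.1 ++ pvChunk
      let out' := st.2.2.2 ++ pvBlock i
      (st.1 ++ [s'], st.2.1 ++ [out'], s', out'))
    ([], [], "<p>_</p>", pvBaseOut)
  (r.1, r.2.1)

-- ===== PRECONDITION & SPEC =====
def Spec_number_input_question_generate (n : Int) (out : List String × List (List (List Int))) : Prop := out = number_input_question_generate_alt n
instance (n : Int) (out : List String × List (List (List Int))) : Decidable (Spec_number_input_question_generate n out) := by unfold Spec_number_input_question_generate; infer_instance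

-- ===== CLAIM (what is proved, stated in full; the proofs are below) =====
def Claim_equal_number_input_question_generate : Prop := ∀ (n : Int), Dom_number_input_question_generate n → Spec_number_input_question_generate n (number_input_question_generate n)

-- ===== LEMMAS AND PROOFS =====

-- A's inner row builder for a range of length m
def pvRow (m : Int) : String × List (List Int) :=
  (PySem.List.pyRange 0 m 1).foldl
    (fun (st : String × List (List Int)) j => (st.1 ++ pvChunk, st.2 ++ pvBlock j))
    ("<p>_</p>", pvBaseOut)

theorem pvRow_succ (m : Nat) :
    pvRow ((m : Int) + 1) = ((pvRow m).1 ++ pvChunk, (pvRow m).2 ++ pvBlock m) := by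
  unfold pvRow
  rw [PySem.List.pyRange_one_succ_right (by exact_mod_cast Int.natCast_nonneg m)]
  rw [List.foldl_append]
  rfl

-- the invariant: after m iterations B's state is (A's lists, A's current row)
theorem pv_invariant (m : Nat) :
    (PySem.List.pyRange 0 (m : Int) 1).foldl
      (fun (st : List String × List (List (List Int)) × String × List (List Int)) i =>
        let s' := st.2.2.1 ++ pvChunk
        let out' := st.2.2.2 ++ pvBlock i
        (st.1 ++ [s'], st.2.1 ++ [out'], s', out'))
      ([], [], "<p>_</p>", pvBaseOut)
    = ((number_input_question_generate (m : Int)).1,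
       (number_input_question_generate (m : Int)).2,
       (pvRow (m : Int)).1, (pvRow (m : Int)).2) := by
  induction m with
  | zero =>
      simp [number_input_question_generate, pvRow, PySem.List.pyRange_zero]
  | succ k ih =>
      have hk : ((k : Int)) ≤ ((k : Int)) + 1 := by omega
      have hcast : ((k + 1 : Nat) : Int) = (k : Int) + 1 := by push_cast; ring
      rw [hcast]
      rw [PySem.List.pyRange_one_succ_right (by exact_mod_cast Int.natCast_nonneg k),
          List.foldl_append, ih]
      unfold number_input_question_generate
      rw [PySem.List.pyRange_one_succ_right (by exact_mod_cast Int.natCast_nonneg k),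
          List.foldl_append]
      simp only [List.foldl_cons, List.foldl_nil]
      have hrow := pvRow_succ k
      have h1 : (List.foldl (fun (st : String × List (List Int)) j => (st.1 ++ pvChunk, st.2 ++ pvBlock j))
          ("<p>_</p>", pvBaseOut) (PySem.List.pyRange 0 ((k : Int) + 1) 1)) = pvRow ((k : Int) + 1) := rfl
      rw [h1, hrow]

-- ===== VERDICT (by name: the statement is the Claim_ definition above) =====
theorem number_input_question_generate_spec : Claim_equal_number_input_question_generate := by
  intro n _
  show number_input_question_generate n = number_input_question_generate_alt n
  unfold number_input_question_generate_alt
  by_cases h : n ≤ 0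
  · rw [PySem.List.pyRange_one_eq_nil h]
    unfold number_input_question_generate
    rw [PySem.List.pyRange_one_eq_nil h]
    rfl
  · obtain ⟨m, rfl⟩ : ∃ m : Nat, n = (m : Int) :=
      ⟨n.toNat, (Int.toNat_of_nonneg (by omega)).symm⟩
    rw [pv_invariant m]
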